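-- pv_equiv track=rewrite | github.com/mariefdum/ionization | ionization/floquet_analysis.py | has_local_extrema
-- ===== SOURCE A (Python) =====
-- def has_local_extrema(arr):
--     n = len(arr)
--     if n < 3:
--         return (
--             False  # Array is too short to have local extrema excluding the endpoints.
--         )
--
--     for i in range(1, n - 1):
--         if arr[i] > arr[i - 1] and arr[i] > arr[i + 1]:
--             return True  # Local maxima found
--         elif arr[i] < arr[i - 1] and arr[i] < arr[i + 1]:
--             return True  # Local minima found
--
--     return False  # No local maxima or minima found excluding the endpoints.
-- ===== SOURCE B (Python) =====
-- def has_local_extrema(arr):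
--     rises = {i for i in range(len(arr) - 1) if arr[i + 1] > arr[i]}
--     falls = {i for i in range(len(arr) - 1) if arr[i + 1] < arr[i]}
--     return any(i + 1 in falls for i in rises) or any(i + 1 in rises for i in falls)
-- ===== Notes on version B (the rewrite author's own statement) =====
-- stated objective: alternative
-- what changed: A is a single early-returning index loop comparing each interior element with both neighbours; B instead builds two hash sets of rise and fall positions in staged passes and decides via set membership whether some rise is immediately followed by a fall or vice versa.
import Mathlib
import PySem

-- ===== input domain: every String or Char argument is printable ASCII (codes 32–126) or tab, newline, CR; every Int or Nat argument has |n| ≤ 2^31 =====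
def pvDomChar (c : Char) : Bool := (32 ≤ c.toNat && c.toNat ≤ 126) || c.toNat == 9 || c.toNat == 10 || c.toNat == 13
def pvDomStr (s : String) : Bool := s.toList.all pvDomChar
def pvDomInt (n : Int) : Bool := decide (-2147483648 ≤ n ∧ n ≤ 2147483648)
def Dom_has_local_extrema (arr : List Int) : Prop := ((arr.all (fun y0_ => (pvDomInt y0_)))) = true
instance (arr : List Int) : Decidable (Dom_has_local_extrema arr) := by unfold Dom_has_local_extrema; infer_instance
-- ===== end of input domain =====

-- B replaces A's early-returning neighbour-comparison loop by staged passes building rise/fall position sets queried by membership (alternative, same cost).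

-- ===== PORT A =====
-- for i in range(1, n-1): check arr[i] against its neighbours; early return ≙ List.any
def has_local_extrema (arr : List Int) : Bool :=
  let n : Int := arr.length
  if n < 3 then false
  else
    (PySem.List.pyRange 1 (n - 1) 1).any (fun i =>
      if PySem.List.pyGetD arr i 0 > PySem.List.pyGetD arr (i - 1) 0 ∧
         PySem.List.pyGetD arr i 0 > PySem.List.pyGetD arr (i + 1) 0 then true
      else if PySem.List.pyGetD arr i 0 < PySem.List.pyGetD arr (i - 1) 0 ∧
              PySem.List.pyGetD arr i 0 < PySem.List.pyGetD arr (i + 1) 0 then true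
      else false)

-- ===== PORT B =====
-- rises/falls = set comprehensions over range(len(arr)-1); answer by membership of i+1 in the other set
def has_local_extrema_alt (arr : List Int) : Bool :=
  let rises : PySem.Set Int := PySem.Set.ofList
    ((PySem.List.pyRange 0 ((arr.length : Int) - 1) 1).filter
      (fun i => PySem.List.pyGetD arr (i + 1) 0 > PySem.List.pyGetD arr i 0))
  let falls : PySem.Set Int := PySem.Set.ofList
    ((PySem.List.pyRange 0 ((arr.length : Int) - 1) 1).filter
      (fun i => PySem.List.pyGetD arr (i + 1) 0 < PySem.List.pyGetD arr i 0))
  rises.any (fun i => PySem.Set.contains falls (i + 1)) ||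
  falls.any (fun i => PySem.Set.contains rises (i + 1))

-- ===== PRECONDITION & SPEC =====
def Spec_has_local_extrema (arr : List Int) (out : Bool) : Prop := out = has_local_extrema_alt arr
instance (arr : List Int) (out : Bool) : Decidable (Spec_has_local_extrema arr out) := by unfold Spec_has_local_extrema; infer_instance

-- ===== CLAIM =====
def Claim_equal_has_local_extrema : Prop := ∀ (arr : List Int), Dom_has_local_extrema arr → Spec_has_local_extrema arr (has_local_extrema arr)

-- ===== LEMMAS AND PROOFS =====

-- common characterisation: some interior position k+1 is a strict local extremum
def pvExt (arr : List Int) : Prop :=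
  ∃ k : Nat, k + 2 < arr.length ∧
    ((arr.getD (k+1) 0 > arr.getD k 0 ∧ arr.getD (k+1) 0 > arr.getD (k+2) 0) ∨
     (arr.getD (k+1) 0 < arr.getD k 0 ∧ arr.getD (k+1) 0 < arr.getD (k+2) 0))

theorem ite_ite_true (p q : Prop) [Decidable p] [Decidable q] :
    (if p then true else if q then true else false) = true ↔ p ∨ q := by
  split_ifs with h1 h2 <;> simp_all

theorem pyGetD_toNat (arr : List Int) (i : Int) (h0 : 0 ≤ i) :
    PySem.List.pyGetD arr i 0 = arr.getD i.toNat 0 := by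
  have h : i = ((i.toNat : Nat) : Int) := by omega
  conv_lhs => rw [h]
  rw [PySem.List.pyGetD_natCast]

theorem A_iff (arr : List Int) : has_local_extrema arr = true ↔ pvExt arr := by
  unfold has_local_extrema pvExt
  by_cases h : (arr.length : Int) < 3
  · simp only [h, if_true]
    constructor
    · intro hfalse; cases hfalse
    · rintro ⟨k, hk, -⟩; omega
  · simp only [h, if_false, List.any_eq_true]
    constructor
    · rintro ⟨i, hi, hP⟩
      rw [PySem.List.mem_pyRange_one] at hi
      obtain ⟨h1, h2⟩ := hi
      refine ⟨(i - 1).toNat, by omega, ?_⟩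
      rw [pyGetD_toNat arr i (by omega), pyGetD_toNat arr (i-1) (by omega),
          pyGetD_toNat arr (i+1) (by omega)] at hP
      rw [ite_ite_true] at hP
      have e1 : i.toNat = (i-1).toNat + 1 := by omega
      have e2 : (i+1).toNat = (i-1).toNat + 2 := by omega
      rw [e1, e2] at hP
      exact hP
    · rintro ⟨k, hk, hC⟩
      refine ⟨(k : Int) + 1, ?_, ?_⟩
      · rw [PySem.List.mem_pyRange_one]; omega
      rw [pyGetD_toNat arr ((k:Int)+1) (by omega), pyGetD_toNat arr ((k:Int)+1-1) (by omega),
          pyGetD_toNat arr ((k:Int)+1+1) (by omega), ite_ite_true]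
      have e1 : ((k:Int)+1).toNat = k + 1 := by omega
      have e0 : ((k:Int)+1-1).toNat = k := by omega
      have e2 : ((k:Int)+1+1).toNat = k + 2 := by omega
      rw [e0, e1, e2]
      exact hC

-- membership in a rise/fall index set
theorem mem_idx_set (arr : List Int) (P : Int → Int → Prop) [∀ a b, Decidable (P a b)] (i : Int) :
    i ∈ PySem.Set.ofList ((PySem.List.pyRange 0 ((arr.length : Int) - 1) 1).filter
        (fun j => decide (P (PySem.List.pyGetD arr (j + 1) 0) (PySem.List.pyGetD arr j 0)))) ↔
      0 ≤ i ∧ i < (arr.length : Int) - 1 ∧ P (PySem.List.pyGetD arr (i + 1) 0) (PySem.List.pyGetD arr i 0) := by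
  rw [PySem.Set.mem_ofList, List.mem_filter, PySem.List.mem_pyRange_one, decide_eq_true_eq]
  tauto

theorem B_iff (arr : List Int) : has_local_extrema_alt arr = true ↔ pvExt arr := by
  unfold has_local_extrema_alt
  simp only [Bool.or_eq_true, List.any_eq_true, PySem.Set.contains_iff]
  constructor
  · rintro (⟨i, hi, hmem⟩ | ⟨i, hi, hmem⟩) <;>
    · rw [mem_idx_set arr _ i] at hi
      rw [mem_idx_set arr _ (i+1)] at hmem
      obtain ⟨h0, h1, hP⟩ := hi
      obtain ⟨_, h2, hQ⟩ := hmem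
      refine ⟨i.toNat, by omega, ?_⟩
      rw [pyGetD_toNat arr i h0, pyGetD_toNat arr (i+1) (by omega)] at hP
      rw [pyGetD_toNat arr (i+1) (by omega), pyGetD_toNat arr (i+1+1) (by omega)] at hQ
      have e1 : (i+1).toNat = i.toNat + 1 := by omega
      have e2 : (i+1+1).toNat = i.toNat + 2 := by omega
      rw [e1] at hP hQ; rw [e2] at hQ
      first
        | exact Or.inl ⟨hP, hQ⟩
        | exact Or.inr ⟨hP, hQ⟩
  · rintro ⟨k, hk, hC | hC⟩
    · refine Or.inl ⟨(k : Int), ?_, ?_⟩ <;> rw [mem_idx_set]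
      · refine ⟨by omega, by omega, ?_⟩
        rw [pyGetD_toNat arr _ (by omega), pyGetD_toNat arr _ (by omega)]
        have e1 : ((k:Int)+1).toNat = k + 1 := by omega
        have e0 : ((k:Int)).toNat = k := by omega
        rw [e0, e1]; exact hC.1
      · refine ⟨by omega, by omega, ?_⟩
        rw [pyGetD_toNat arr _ (by omega), pyGetD_toNat arr _ (by omega)]
        have e1 : ((k:Int)+1).toNat = k + 1 := by omega
        have e2 : ((k:Int)+1+1).toNat = k + 2 := by omega
        rw [e1, e2]; exact hC.2
    · refine Or.inr ⟨(k : Int), ?_, ?_⟩ <;> rw [mem_idx_set]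
      · refine ⟨by omega, by omega, ?_⟩
        rw [pyGetD_toNat arr _ (by omega), pyGetD_toNat arr _ (by omega)]
        have e1 : ((k:Int)+1).toNat = k + 1 := by omega
        have e0 : ((k:Int)).toNat = k := by omega
        rw [e0, e1]; exact hC.1
      · refine ⟨by omega, by omega, ?_⟩
        rw [pyGetD_toNat arr _ (by omega), pyGetD_toNat arr _ (by omega)]
        have e1 : ((k:Int)+1).toNat = k + 1 := by omega
        have e2 : ((k:Int)+1+1).toNat = k + 2 := by omega
        rw [e1, e2]; exact hC.2

-- ===== VERDICT =====
theorem has_local_extrema_spec : Claim_equal_has_local_extrema := by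
  intro arr _
  unfold Spec_has_local_extrema
  by_cases h : pvExt arr
  · rw [(A_iff arr).mpr h, (B_iff arr).mpr h]
  · rw [Bool.eq_false_iff.mpr (fun c => h ((A_iff arr).mp c)),
        Bool.eq_false_iff.mpr (fun c => h ((B_iff arr).mp c))]
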